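-- pv_equiv track=rewrite | github.com/daniel-reich/ubiquitous-fiesta | WyttgdGuQGaRBqhhP_19.py | min_palindrome_steps
-- ===== SOURCE A (Python) =====
-- def min_palindrome_steps(s):
--     st = 0
--     i, j = 0, len(s)-1
--     while i <= j:
--         if s[i] == s[j]:
--             i += 1
--             j -= 1
--         else:
--             j = len(s) -1
--             st += 1
--             i = st
--     return st
-- ===== SOURCE B (Python) =====
-- def min_palindrome_steps(s):
--     for st in range(len(s)):
--         suffix = s[st:]
--         if suffix == suffix[::-1]:
--             return st
--     return 0
-- ===== Notes on version B (the rewrite author's own statement) =====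
-- stated objective: simpler
-- what changed: B directly returns the first start index whose suffix equals its own reversal (one slice-reverse comparison per candidate), replacing A's two-pointer scan with manual restart bookkeeping (mutable st/i/j state).
import Mathlib
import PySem

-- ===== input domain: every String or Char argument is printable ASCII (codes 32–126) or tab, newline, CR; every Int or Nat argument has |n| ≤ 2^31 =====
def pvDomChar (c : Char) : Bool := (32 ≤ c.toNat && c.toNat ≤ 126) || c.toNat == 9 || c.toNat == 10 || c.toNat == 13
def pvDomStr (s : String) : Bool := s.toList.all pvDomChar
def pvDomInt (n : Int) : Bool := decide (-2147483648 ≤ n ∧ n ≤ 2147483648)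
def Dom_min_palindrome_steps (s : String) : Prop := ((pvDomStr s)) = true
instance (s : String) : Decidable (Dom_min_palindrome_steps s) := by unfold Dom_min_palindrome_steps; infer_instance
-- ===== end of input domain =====

-- B replaces A's two-pointer scan with manual restart bookkeeping by a plain search for
-- the first start index whose suffix equals its own reversal (objective: simpler).

-- ===== PORT A =====
-- A's while-loop, step for step over the same state (st, i, j). The fuel argument is only
-- a guard that makes the computation total: it decreases by 1 per loop iteration, and the
-- entry point passes (len+1)*(len+2), proven below to exceed A's iteration count, so the
-- fuel never runs out on any input.
def pvGoA (cs : List Char) : Nat → Int → Int → Int → Int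
  | 0, st, _i, _j => st
  | fuel + 1, st, i, j =>
    if i ≤ j then
      if PySem.List.pyGet? cs i = PySem.List.pyGet? cs j then
        pvGoA cs fuel st (i + 1) (j - 1)
      else
        pvGoA cs fuel (st + 1) (st + 1) ((cs.length : Int) - 1)
    else st

def min_palindrome_steps (s : String) : Int :=
  pvGoA s.toList ((s.toList.length + 1) * (s.toList.length + 2)) 0 0 ((s.toList.length : Int) - 1)

-- ===== PORT B =====
-- B's for-loop over st in range(len(s)), with early return on the first palindromic
-- suffix; s[st:] is cs.drop st (exact since 0 ≤ st) and s[::-1] is List.reverse;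
-- falls through to 0 when the range is exhausted.
def pvGoB (cs : List Char) : List Nat → Int
  | [] => 0
  | st :: rest =>
    if cs.drop st = (cs.drop st).reverse then (st : Int) else pvGoB cs rest

def min_palindrome_steps_alt (s : String) : Int :=
  pvGoB s.toList (List.range s.toList.length)

-- ===== PRECONDITION & SPEC =====
def Spec_min_palindrome_steps (s : String) (out : Int) : Prop := out = min_palindrome_steps_alt s
instance (s : String) (out : Int) : Decidable (Spec_min_palindrome_steps s out) := by unfold Spec_min_palindrome_steps; infer_instance

-- ===== CLAIM (what is proved, stated in full; the proofs are below) =====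
def Claim_equal_min_palindrome_steps : Prop := ∀ (s : String), Dom_min_palindrome_steps s → Spec_min_palindrome_steps s (min_palindrome_steps s)

-- ===== LEMMAS AND PROOFS =====

-- If every remaining pair mirrors around the centre i + j, A's scan succeeds and returns st.
theorem pvGoA_success (cs : List Char) (st : Int) :
    ∀ (f : Nat) (i j : Int), (j - i + 1).toNat ≤ f →
    (∀ k : Int, i ≤ k → k ≤ j →
      PySem.List.pyGet? cs k = PySem.List.pyGet? cs (i + j - k)) →
    pvGoA cs f st i j = st := by
  intro f
  induction f with
  | zero => intro i j hn hmir; rfl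
  | succ f ih =>
    intro i j hn hmir
    rw [pvGoA]
    by_cases hij : i ≤ j
    · have heq : PySem.List.pyGet? cs i = PySem.List.pyGet? cs j := by
        have := hmir i le_rfl hij
        have h2 : i + j - i = j := by omega
        rwa [h2] at this
      simp only [hij, if_true, heq]
      apply ih
      · omega
      · intro k hk1 hk2
        have h3 : i + 1 + (j - 1) - k = i + j - k := by omega
        rw [h3]
        exact hmir k (by omega) (by omega)
    · simp [hij]

-- If some remaining pair mismatches, A's scan fails and restarts at st + 1, consuming at
-- most (j - i + 1) + 1 units of fuel.
theorem pvGoA_fail (cs : List Char) (st : Int) :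
    ∀ (f : Nat) (i j : Int), (j - i + 1).toNat < f →
    (∃ k : Int, i ≤ k ∧ k ≤ j ∧
      PySem.List.pyGet? cs k ≠ PySem.List.pyGet? cs (i + j - k)) →
    ∃ f' : Nat, pvGoA cs f st i j = pvGoA cs f' (st + 1) (st + 1) ((cs.length : Int) - 1)
      ∧ f ≤ f' + (j - i + 1).toNat + 1 ∧ f' < f := by
  intro f
  induction f with
  | zero =>
    intro i j hn hmis
    omega
  | succ f ih =>
    intro i j hn hmis
    obtain ⟨k, hk1, hk2, hkne⟩ := hmis
    have hij : i ≤ j := by omega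
    rw [pvGoA]
    by_cases heq : PySem.List.pyGet? cs i = PySem.List.pyGet? cs j
    · simp only [hij, if_true, heq]
      have hki : k ≠ i := by
        rintro rfl
        apply hkne
        have h2 : k + j - k = j := by omega
        rw [h2]; exact heq
      have hkj : k ≠ j := by
        rintro rfl
        apply hkne
        have h2 : i + k - k = i := by omega
        rw [h2]; exact heq.symm
      have hmis' : ∃ k : Int, i + 1 ≤ k ∧ k ≤ j - 1 ∧
          PySem.List.pyGet? cs k ≠ PySem.List.pyGet? cs (i + 1 + (j - 1) - k) := by
        refine ⟨k, by omega, by omega, ?_⟩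
        have h3 : i + 1 + (j - 1) - k = i + j - k := by omega
        rw [h3]; exact hkne
      obtain ⟨f', he, hb, hlt⟩ := ih (i + 1) (j - 1) (by omega) hmis'
      exact ⟨f', he, by omega, by omega⟩
    · simp only [hij, if_true, heq, if_false]
      exact ⟨f, rfl, by omega, by omega⟩

-- A list equals its reverse iff every element equals its mirror element.
theorem pal_iff_ptwise (l : List Char) :
    (l = l.reverse ↔ ∀ a : Nat, a < l.length → l[a]? = l[l.length - 1 - a]?) := by
  constructor
  · intro hpal a ha
    conv_lhs => rw [hpal]
    exact List.getElem?_reverse ha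
  · intro h
    apply List.ext_getElem?
    intro a
    by_cases ha : a < l.length
    · rw [List.getElem?_reverse ha]
      exact h a ha
    · rw [List.getElem?_eq_none (by omega), List.getElem?_eq_none (by simp; omega)]

-- drop st is a palindrome iff all pairs of cs mirror around the centre st + (len - 1).
theorem pal_iff_mirror (cs : List Char) (st : Nat) (hst : st < cs.length) :
    (cs.drop st = (cs.drop st).reverse ↔
      ∀ k : Int, (st : Int) ≤ k → k ≤ (cs.length : Int) - 1 →
        PySem.List.pyGet? cs k = PySem.List.pyGet? cs ((st : Int) + ((cs.length : Int) - 1) - k)) := by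
  rw [pal_iff_ptwise]
  have hlen : (cs.drop st).length = cs.length - st := by simp
  constructor
  · intro h k hk1 hk2
    have hk0 : 0 ≤ k := by omega
    set j : Int := (st : Int) + ((cs.length : Int) - 1) - k with hj
    have hj0 : 0 ≤ j := by omega
    rw [PySem.List.pyGet?_of_nonneg cs hk0, PySem.List.pyGet?_of_nonneg cs hj0]
    have e1 : st + (k.toNat - st) = k.toNat := by omega
    have e2 : st + ((cs.drop st).length - 1 - (k.toNat - st)) = j.toNat := by
      rw [hlen]; omega
    calc cs[k.toNat]?
        = (cs.drop st)[k.toNat - st]? := by rw [List.getElem?_drop, e1]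
      _ = (cs.drop st)[(cs.drop st).length - 1 - (k.toNat - st)]? :=
          h (k.toNat - st) (by rw [hlen]; omega)
      _ = cs[j.toNat]? := by rw [List.getElem?_drop, e2]
  · intro h a ha
    have ha' : a < cs.length - st := by rw [hlen] at ha; omega
    have := h ((st + a : Nat) : Int) (by push_cast; omega) (by push_cast; omega)
    set j : Int := (st : Int) + ((cs.length : Int) - 1) - ((st + a : Nat) : Int) with hj
    rw [PySem.List.pyGet?_of_nonneg cs (by omega),
        PySem.List.pyGet?_of_nonneg cs (by omega)] at this
    have e1 : ((st + a : Nat) : Int).toNat = st + a := by omega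
    have e2 : j.toNat = st + ((cs.drop st).length - 1 - a) := by
      rw [hlen]; omega
    rw [e1, e2] at this
    rw [List.getElem?_drop, List.getElem?_drop]
    exact this

-- A suffix of length 1 is a palindrome, so neither loop runs past st = len - 1, and the
-- fuel (len - st) * (len + 2) suffices for the passes from start index st onwards.
theorem loops_agree (cs : List Char) :
    ∀ (m st : Nat), st < cs.length → cs.length - st ≤ m →
    ∀ f : Nat, (cs.length - st) * (cs.length + 2) ≤ f →
    pvGoA cs f (st : Int) (st : Int) ((cs.length : Int) - 1)
      = pvGoB cs (List.range' st (cs.length - st)) := by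
  intro m
  induction m with
  | zero => intro st hst hm; omega
  | succ m ih =>
    intro st hst hm f hf
    have hrange : cs.length - st = (cs.length - (st + 1)) + 1 := by omega
    rw [hrange, List.range'_succ]
    by_cases hpal : cs.drop st = (cs.drop st).reverse
    · rw [pvGoB, if_pos hpal]
      apply pvGoA_success
      · have h1 : cs.length - st ≤ (cs.length - st) * (cs.length + 2) :=
          Nat.le_mul_of_pos_right (cs.length - st) (by omega)
        omega
      · exact (pal_iff_mirror cs st hst).mp hpal
    · have hmis := (pal_iff_mirror cs st hst).not.mp hpal
      push Not at hmis
      obtain ⟨k, hk1, hk2, hkne⟩ := hmis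
      have hstep : st + 1 < cs.length := by
        by_contra hcon
        have hone : (cs.drop st).length = 1 := by simp; omega
        obtain ⟨a, hae⟩ := List.length_eq_one_iff.mp hone
        apply hpal
        rw [hae]; rfl
      have hflow : (cs.length - st) * (cs.length + 2)
          = (cs.length - (st + 1)) * (cs.length + 2) + (cs.length + 2) := by
        rw [hrange, Nat.succ_mul]
      have hbig : ((cs.length : Int) - 1 - st + 1).toNat < f := by
        have h1 : cs.length + 2 ≤ (cs.length - st) * (cs.length + 2) :=
          Nat.le_mul_of_pos_left (cs.length + 2) (by omega)
        omega
      obtain ⟨f', he, hb, hlt⟩ :=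
        pvGoA_fail cs (st : Int) f (st : Int) ((cs.length : Int) - 1) hbig ⟨k, hk1, hk2, hkne⟩
      rw [he]
      rw [pvGoB, if_neg hpal]
      have hcast : ((st : Int) + 1) = (((st + 1 : Nat)) : Int) := by push_cast; ring
      rw [hcast]
      rw [ih (st + 1) hstep (by omega) f' (by omega)]

-- ===== VERDICT (by name: the statement is the Claim_ definition above) =====
theorem min_palindrome_steps_spec : Claim_equal_min_palindrome_steps := by
  intro s _
  unfold Spec_min_palindrome_steps min_palindrome_steps min_palindrome_steps_alt
  by_cases h : 0 < s.toList.length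
  · have hl := loops_agree s.toList s.toList.length 0 h (by omega)
      ((s.toList.length + 1) * (s.toList.length + 2))
      (by simpa using Nat.mul_le_mul (Nat.le_succ s.toList.length) (le_refl (s.toList.length + 2)))
    simp only [Nat.cast_zero, Nat.sub_zero] at hl
    rw [List.range_eq_range']
    exact hl
  · simp only [Nat.not_lt, Nat.le_zero] at h
    have hnil : s.toList = [] := List.eq_nil_of_length_eq_zero h
    rw [hnil]
    rfl
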